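-- pv_equiv track=rewrite | github.com/ThunderXBlitZ/Annagram_Bot | src/anagram_engine.py | remove_anagram
-- ===== SOURCE A (Python) =====
-- def remove_anagram(word_list):
--     # Create a counting dictionary by sorting letters in words
--     sorted_dict = {}
--     for word in word_list:
--         word_sorted = ''.join(sorted(word))
--         if word_sorted not in sorted_dict.keys():
--             sorted_dict[word_sorted] = 1
--         else:
--             sorted_dict[word_sorted] += 1
--
--     # iterate again
--     word_list_clean = [x for x in word_list if sorted_dict[''.join(sorted(x))] == 1]
--     return word_list_clean
-- ===== SOURCE B (Python) =====
-- def remove_anagram(word_list):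
--     # Worklist class-elimination: no counting dictionary. Repeatedly take the
--     # first pending word; if any later pending word is an anagram of it, the
--     # whole anagram class is discarded, otherwise the word is kept; recurse on
--     # the pending words with that class removed.
--     out = []
--     pending = word_list
--     while pending:
--         head, tail = pending[0], pending[1:]
--         k = ''.join(sorted(head))
--         rest = [w for w in tail if ''.join(sorted(w)) != k]
--         if len(rest) == len(tail):
--             out.append(head)
--         pending = rest
--     return out
-- ===== Notes on version B (the rewrite author's own statement) =====
-- stated objective: alternative
-- what changed: Replaced the dict-counting pass plus filter by a worklist class-elimination loop: repeatedly pop the first pending word, scan the remaining pending words for anagram partners, keep the word only if none exist, and continue on the pending list with that whole anagram class removed.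
import Mathlib
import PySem

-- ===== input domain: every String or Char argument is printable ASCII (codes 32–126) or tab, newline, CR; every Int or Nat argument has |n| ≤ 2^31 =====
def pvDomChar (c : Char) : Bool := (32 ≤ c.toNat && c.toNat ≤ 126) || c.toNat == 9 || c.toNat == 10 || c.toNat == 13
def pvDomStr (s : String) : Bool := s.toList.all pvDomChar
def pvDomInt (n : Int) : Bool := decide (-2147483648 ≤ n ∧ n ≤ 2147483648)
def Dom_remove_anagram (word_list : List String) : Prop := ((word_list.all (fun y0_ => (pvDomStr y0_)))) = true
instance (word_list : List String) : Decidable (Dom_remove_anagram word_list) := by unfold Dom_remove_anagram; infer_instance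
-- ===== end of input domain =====

-- B replaces A's counting dictionary by a worklist class-elimination loop (alternative, same results).


-- ===== PORT A =====
-- ''.join(sorted(w)) : sorting the characters of w and joining is exactly String.mk of the sorted char list
def anagramKey (w : String) : String := String.ofList (PySem.List.sorted w.toList (fun c => c) false)

def remove_anagram (word_list : List String) : List String :=
  let sorted_dict : PySem.Dict String Int :=
    word_list.foldl (fun d word =>
      let word_sorted := anagramKey word
      if d.contains word_sorted = false then d.insert word_sorted 1
      else d.insert word_sorted (d.getD word_sorted 0 + 1)) PySem.Dict.empty
  word_list.filter (fun x => sorted_dict.get? (anagramKey x) == some 1)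

-- ===== PORT B =====
-- the while loop of Source B: state (out, pending); pending strictly shrinks each round
def removeAnagramLoop (out : List String) (pending : List String) : List String :=
  match pending with
  | [] => out
  | head :: tail =>
    let k := anagramKey head
    let rest := tail.filter (fun w => anagramKey w != k)
    if rest.length = tail.length then removeAnagramLoop (out ++ [head]) rest
    else removeAnagramLoop out rest
termination_by pending.length
decreasing_by
  · simpa using Nat.lt_succ_of_le (List.length_filter_le _ _)
  · simpa using Nat.lt_succ_of_le (List.length_filter_le _ _)

def remove_anagram_alt (word_list : List String) : List String :=
  removeAnagramLoop [] word_list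

-- ===== PRECONDITION & SPEC =====
def Spec_remove_anagram (word_list : List String) (out : List String) : Prop := out = remove_anagram_alt word_list
instance (word_list : List String) (out : List String) : Decidable (Spec_remove_anagram word_list out) := by unfold Spec_remove_anagram; infer_instance

-- ===== CLAIM (what is proved, stated in full; the proofs are below) =====
def Claim_equal_remove_anagram : Prop := ∀ (word_list : List String), Dom_remove_anagram word_list → Spec_remove_anagram word_list (remove_anagram word_list)

-- ===== LEMMAS AND PROOFS =====

-- A's build loop is Counter(map key word_list)
theorem remove_anagram_dict_eq (word_list : List String) :
    word_list.foldl (fun d word =>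
      let word_sorted := anagramKey word
      if d.contains word_sorted = false then d.insert word_sorted 1
      else d.insert word_sorted (d.getD word_sorted 0 + 1)) PySem.Dict.empty
    = PySem.Dict.counter (word_list.map (fun y => anagramKey y)) := by
  rw [← PySem.Dict.foldl_insert_getD_add_one_eq_counter, List.foldl_map]
  apply PySem.List.foldl_congr_mem
  intro d w _
  simp only
  by_cases h : d.contains (anagramKey w) = false
  · rw [if_pos h, PySem.Dict.getD_of_not_contains (h := h), zero_add]
  · rw [if_neg h]

-- A returns exactly the words whose key occurs once among all keys
theorem remove_anagram_eq_filter_count (l : List String) :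
    remove_anagram l
      = l.filter (fun x => (l.map anagramKey).count (anagramKey x) == 1) := by
  unfold remove_anagram
  simp only [remove_anagram_dict_eq]
  apply List.filter_congr
  intro x hx
  have hmem : anagramKey x ∈ l.map anagramKey := List.mem_map_of_mem hx
  have hget : (PySem.Dict.counter (l.map anagramKey)).get? (anagramKey x)
      = some (((l.map anagramKey).count (anagramKey x) : Nat) : Int) := by
    have hc : (PySem.Dict.counter (l.map anagramKey)).contains (anagramKey x) = true := by
      rw [PySem.Dict.contains_iff_mem_keys, PySem.Dict.keys_counter]
      exact (PySem.Set.mem_ofList _ _).mpr hmem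
    cases hg : (PySem.Dict.counter (l.map anagramKey)).get? (anagramKey x) with
    | none =>
        rw [PySem.Dict.contains_eq_isSome_get?, hg] at hc
        simp at hc
    | some v =>
        have := PySem.Dict.getD_of_get?_eq_some _ (0:Int) hg
        rw [PySem.Dict.getD_counter] at this
        rw [this]
  rw [hget]
  by_cases h : (l.map anagramKey).count (anagramKey x) = 1
  · simp [h]
  · have h' : ((l.map anagramKey).count (anagramKey x) : Int) ≠ 1 := by omega
    simp [h, h']

-- counts of a non-k key are unchanged by deleting the k-keyed words
theorem count_map_filter_ne (t : List String) (k a : String) (ha : a ≠ k) :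
    ((t.filter (fun w => anagramKey w != k)).map anagramKey).count a
      = (t.map anagramKey).count a := by
  simp only [List.count_eq_countP, List.countP_map, List.countP_filter]
  apply List.countP_congr
  intro w _
  constructor <;> intro h
  · simpa using (by simpa using h : (anagramKey w = a) ∧ _).1
  · have hwa : anagramKey w = a := by simpa using h
    simp [Function.comp, hwa, ha]

-- loop invariant: the loop appends exactly the unique-key words of pending
theorem removeAnagramLoop_eq (out pending : List String) :
    removeAnagramLoop out pending
      = out ++ pending.filter (fun x => (pending.map anagramKey).count (anagramKey x) == 1) := by
  match pending with
  | [] => simp [removeAnagramLoop]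
  | head :: tail =>
    have hdec : (tail.filter (fun w => anagramKey w != anagramKey head)).length < (head :: tail).length :=
      Nat.lt_succ_of_le (List.length_filter_le _ _)
    by_cases hlen : (tail.filter (fun w => anagramKey w != anagramKey head)).length = tail.length
    · have ih := removeAnagramLoop_eq (out ++ [head]) (tail.filter (fun w => anagramKey w != anagramKey head))
      have hall : ∀ w ∈ tail, anagramKey w ≠ anagramKey head := by
        intro w hw
        have := (List.length_filter_eq_length_iff).mp hlen w hw
        simpa using this
      have hrest : tail.filter (fun w => anagramKey w != anagramKey head) = tail :=
        List.filter_eq_self.mpr (by intro w hw; simpa using hall w hw)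
      have hk0 : (tail.map anagramKey).count (anagramKey head) = 0 := by
        rw [List.count_eq_zero]
        intro hmem
        obtain ⟨w, hw, hkw⟩ := List.mem_map.mp hmem
        exact hall w hw hkw
      rw [removeAnagramLoop]
      simp only [if_pos hlen]
      rw [ih, hrest]
      have hpredh : (((head :: tail).map anagramKey).count (anagramKey head) == 1) = true := by
        simp [List.count_cons_self, hk0]
      have heq : tail.filter (fun x => ((tail.map anagramKey).count (anagramKey x) == 1))
          = tail.filter (fun x => (((head :: tail).map anagramKey).count (anagramKey x) == 1)) := by
        apply List.filter_congr
        intro x hx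
        have hxk : anagramKey head ≠ anagramKey x := Ne.symm (hall x hx)
        simp [hxk]
      rw [List.filter_cons, if_pos hpredh, heq]
      simp
    · have ih := removeAnagramLoop_eq out (tail.filter (fun w => anagramKey w != anagramKey head))
      have hex : ∃ w ∈ tail, anagramKey w = anagramKey head := by
        by_contra hc
        push Not at hc
        exact hlen (List.length_filter_eq_length_iff.mpr (by
          intro w hw; simpa using hc w hw))
      obtain ⟨w, hw, hkw⟩ := hex
      have hk1 : 1 ≤ (tail.map anagramKey).count (anagramKey head) :=
        List.one_le_count_iff.mpr (List.mem_map.mpr ⟨w, hw, hkw⟩)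
      rw [removeAnagramLoop]
      simp only [if_neg hlen]
      rw [ih]
      congr 1
      have hpredh : (((head :: tail).map anagramKey).count (anagramKey head) == 1) = false := by
        simp only [List.map_cons, List.count_cons_self, beq_eq_false_iff_ne]
        omega
      rw [List.filter_cons, if_neg (by simp only [hpredh]; exact Bool.false_ne_true)]
      have hsplit : tail.filter (fun x => (((head :: tail).map anagramKey).count (anagramKey x) == 1))
          = (tail.filter (fun w => anagramKey w != anagramKey head)).filter
              (fun x => (((head :: tail).map anagramKey).count (anagramKey x) == 1)) := by
        rw [List.filter_filter]
        apply List.filter_congr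
        intro x _
        by_cases hxk : anagramKey x = anagramKey head
        · have hf : (((head :: tail).map anagramKey).count (anagramKey x) == 1) = false := by
            simp only [List.map_cons, hxk, List.count_cons_self, beq_eq_false_iff_ne]
            omega
          rw [hf, Bool.false_and]
        · have hq : (anagramKey x != anagramKey head) = true := by simp [hxk]
          rw [hq, Bool.and_true]
      rw [hsplit]
      apply List.filter_congr
      intro x hx
      have hxk : anagramKey x ≠ anagramKey head := by
        have := List.of_mem_filter hx
        simpa using this
      rw [count_map_filter_ne tail (anagramKey head) _ hxk]
      simp [Ne.symm hxk]
termination_by pending.length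
decreasing_by all_goals exact hdec

-- ===== VERDICT (by name: the statement is the Claim_ definition above) =====
theorem remove_anagram_spec : Claim_equal_remove_anagram := by
  intro l _
  show remove_anagram l = remove_anagram_alt l
  rw [remove_anagram_eq_filter_count, remove_anagram_alt, removeAnagramLoop_eq, List.nil_append]
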